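-- pv_equiv track=rewrite | github.com/aeryncaen/ml-experiments | src/heuristic_secrets/bytemasker/dataset.py | compute_length_bins
-- ===== SOURCE A (Python) =====
-- def compute_length_bins(lengths: list[int], n_bins: int = 8) -> list[int]:
--     if not lengths:
--         return [512]
--     sorted_lens = sorted(lengths)
--     n = len(sorted_lens)
--     bins = []
--     for i in range(1, n_bins):
--         idx = int(n * i / n_bins)
--         bins.append(sorted_lens[idx])
--     bins.append(sorted_lens[-1])
--     return sorted(set(bins))
-- ===== SOURCE B (Python) =====
-- def compute_length_bins(lengths: list[int], n_bins: int = 8) -> list[int]: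
--     if not lengths:
--         return [512]
--     # histogram instead of a full sort: count each value once
--     freq = {}
--     for v in lengths:
--         freq[v] = freq.get(v, 0) + 1
--     n = len(lengths)
--     # the ranks (0-based order statistics) the quantile cuts ask for
--     targets = {n * i // n_bins for i in range(1, n_bins)}
--     targets.add(n - 1)
--     ts = sorted(targets)
--     # cumulative scan over the sorted DISTINCT values, merged with the sorted
--     # ranks: a value v is a bin edge iff some rank falls in [prev, cum)
--     out = []
--     cum = 0
--     ti = 0
--     for v in sorted(freq):
--         cum += freq[v]
--         if ti < len(ts) and ts[ti] < cum:
--             out.append(v)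
--             while ti < len(ts) and ts[ti] < cum:
--                 ti += 1
--     return out
-- ===== Notes on version B (the rewrite author's own statement) =====
-- stated objective: alternative
-- what changed: B never sorts the data: it builds a value->count histogram, sorts only the distinct values and the requested ranks, and emits a value iff a target rank falls in its cumulative-count interval via a two-pointer merge, instead of A's full sort, positional indexing and sorted(set(...)) dedup; the float cut int(n*i/n_bins) becomes exact integer floor division.
import Mathlib
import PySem

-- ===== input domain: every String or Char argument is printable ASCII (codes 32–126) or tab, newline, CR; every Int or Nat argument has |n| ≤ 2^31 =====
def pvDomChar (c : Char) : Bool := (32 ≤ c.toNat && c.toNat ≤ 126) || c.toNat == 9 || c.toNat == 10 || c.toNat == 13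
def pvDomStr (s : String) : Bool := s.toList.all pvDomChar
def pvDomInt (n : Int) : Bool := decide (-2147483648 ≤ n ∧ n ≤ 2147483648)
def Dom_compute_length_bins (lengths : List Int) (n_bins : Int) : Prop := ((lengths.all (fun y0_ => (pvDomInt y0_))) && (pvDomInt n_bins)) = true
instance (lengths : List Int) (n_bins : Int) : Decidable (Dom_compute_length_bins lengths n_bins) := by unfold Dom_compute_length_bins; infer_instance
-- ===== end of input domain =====

-- B replaces A's full sort + positional indexing by a value histogram, a sort of the
-- distinct values only, and a cumulative-count scan selecting the target order
-- statistics (objective: alternative).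

-- ===== PORT A =====
-- Python's `int(n * i / n_bins)` (float division then truncation) is ported as integer floor
-- division, exact at the scale of the stated domain; list indexing is via PySem.List.pyGet?
-- with a .getD 0 that is never reached (the indices are in range).
def compute_length_bins (lengths : List Int) (n_bins : Int) : List Int :=
  if lengths = [] then [512]
  else
    let sorted_lens := PySem.List.sorted lengths id
    let n : Int := (sorted_lens.length : Int)
    let bins : List Int := (PySem.List.pyRange 1 n_bins).foldl
      (fun acc i =>
        let idx := PySem.Int.floordiv (n * i) n_bins
        acc ++ [(PySem.List.pyGet? sorted_lens idx).getD 0]) []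
    let bins := bins ++ [(PySem.List.pyGet? sorted_lens (-1)).getD 0]
    PySem.List.sorted (PySem.Set.ofList bins) id

-- ===== PORT B =====
-- the `while ti < len(ts) and ts[ti] < cum: ti += 1` loop, ported step for step
def pvAdvance (ts : List Int) (cum : Int) (ti : Nat) : Nat :=
  if h : ti < ts.length then
    if ts[ti] < cum then pvAdvance ts cum (ti + 1) else ti
  else ti
termination_by ts.length - ti

def compute_length_bins_alt (lengths : List Int) (n_bins : Int) : List Int :=
  if lengths = [] then [512]
  else
    let freq : PySem.Dict Int Int :=
      lengths.foldl (fun d v => d.insert v (d.getD v 0 + 1)) PySem.Dict.empty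
    let n : Int := (lengths.length : Int)
    let targets : PySem.Set Int := ((PySem.List.pyRange 1 n_bins).foldl
      (fun st i => st.add (PySem.Int.floordiv (n * i) n_bins)) (PySem.Set.ofList [])).add (n - 1)
    let ts := PySem.List.sorted targets id
    ((PySem.List.sorted freq.keys id).foldl
      (fun (st : Int × Nat × List Int) v =>
        let cum := st.1 + freq.getD v 0
        if h : st.2.1 < ts.length then
          if ts[st.2.1] < cum then
            (cum, pvAdvance ts cum st.2.1, st.2.2 ++ [v])
          else (cum, st.2.1, st.2.2)
        else (cum, st.2.1, st.2.2))
      ((0 : Int), (0 : Nat), ([] : List Int))).2.2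

-- ===== PRECONDITION & SPEC =====
def Spec_compute_length_bins (lengths : List Int) (n_bins : Int) (out : List Int) : Prop := out = compute_length_bins_alt lengths n_bins
instance (lengths : List Int) (n_bins : Int) (out : List Int) : Decidable (Spec_compute_length_bins lengths n_bins out) := by unfold Spec_compute_length_bins; infer_instance

-- ===== CLAIM (what is proved, stated in full; the proofs are below) =====
def Claim_equal_compute_length_bins : Prop := ∀ (lengths : List Int) (n_bins : Int), Dom_compute_length_bins lengths n_bins → Spec_compute_length_bins lengths n_bins (compute_length_bins lengths n_bins)

-- ===== LEMMAS AND PROOFS =====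

-- membership in the index set built by a fold of Set.add
theorem pv_mem_foldl_add (L : List Int) (g : Int → Int) (s0 : PySem.Set Int) (x : Int) :
    x ∈ L.foldl (fun st i => st.add (g i)) s0 ↔ x ∈ s0 ∨ ∃ i ∈ L, x = g i := by
  induction L generalizing s0 with
  | nil => simp
  | cons a L ih =>
    simp only [List.foldl_cons, ih, PySem.Set.mem_add, List.mem_cons]
    constructor
    · rintro ((h | h) | ⟨i, hi, rfl⟩)
      · exact Or.inl h
      · exact Or.inr ⟨a, Or.inl rfl, h⟩
      · exact Or.inr ⟨i, Or.inr hi, rfl⟩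
    · rintro (h | ⟨i, (rfl | hi), rfl⟩)
      · exact Or.inl (Or.inl h)
      · exact Or.inl (Or.inr rfl)
      · exact Or.inr ⟨i, hi, rfl⟩

-- the cut indices are in range
theorem pv_idx_bounds (n n_bins i : Int) (hn : 1 ≤ n) (hi : 1 ≤ i) (hib : i < n_bins) :
    0 ≤ PySem.Int.floordiv (n * i) n_bins ∧ PySem.Int.floordiv (n * i) n_bins < n := by
  have hb : 0 < n_bins := lt_of_le_of_lt (by omega) hib
  constructor
  · rw [PySem.Int.le_floordiv_iff_mul_le hb]
    nlinarith
  · rw [PySem.Int.floordiv_lt_iff_lt_mul hb]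
    nlinarith

-- s[-1] is s[len-1]
theorem pv_get_neg_one (s : List Int) (h : s ≠ []) :
    PySem.List.pyGet? s (-1) = PySem.List.pyGet? s ((s.length : Int) - 1) := by
  have hlen : 1 ≤ s.length := List.length_pos_iff.mpr h
  simp only [PySem.List.pyGet?, PySem.List.pyIdx?]
  have h1 : ¬ (0 : Int) ≤ -1 := by omega
  have h2 : -(s.length : Int) ≤ -1 := by omega
  have h3 : (0 : Int) ≤ (s.length : Int) - 1 := by omega
  have h4 : (s.length : Int) - 1 < (s.length : Int) := by omega
  have h5 : s.length - ((-(-1) : Int)).toNat = ((s.length : Int) - 1).toNat := by omega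
  rw [if_neg h1, if_pos h2, if_pos h3, if_pos h4, h5]

-- counting: #(≤ v) = #(< v) + #(= v)
theorem pv_count_le_split (l : List Int) (v : Int) :
    l.countP (fun y => decide (y ≤ v)) = l.countP (fun y => decide (y < v)) + l.count v := by
  induction l with
  | nil => simp
  | cons a l ih =>
    simp only [List.countP_cons, List.count_cons, ih]
    by_cases h1 : a ≤ v <;> by_cases h2 : a < v <;> by_cases h3 : a = v <;>
      simp [h1, h2, h3] <;> omega

-- in a nondecreasing list, a downward-closed predicate holds at position t iff t < countP
theorem pv_sorted_getElem_p (s : List Int) (hs : s.Pairwise (· ≤ ·)) (p : Int → Bool)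
    (hdc : ∀ a b : Int, a ≤ b → p b = true → p a = true) :
    ∀ (t : Nat), (ht : t < s.length) → (p s[t] = true ↔ t < s.countP p) := by
  induction s with
  | nil => intro t ht; simp at ht
  | cons a s ih =>
    obtain ⟨ha, hs'⟩ := List.pairwise_cons.mp hs
    intro t ht
    by_cases hpa : p a = true
    · cases t with
      | zero => simp [hpa]
      | succ t =>
        have ht' : t < s.length := by simpa using ht
        simp only [List.getElem_cons_succ, List.countP_cons, hpa, if_pos]
        rw [ih hs' t ht']
        omega
    · have hz : s.countP p = 0 := by
        rw [List.countP_eq_zero]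
        intro y hy hpy
        exact hpa (hdc a y (ha y hy) hpy)
      have hz' : (a :: s).countP p = 0 := by
        simp [hz, hpa]
      rw [hz']
      cases t with
      | zero => simpa using hpa
      | succ t =>
        have ht' : t < s.length := by simpa using ht
        simp only [List.getElem_cons_succ]
        constructor
        · intro hpy
          exact absurd ((ih hs' t ht').mp hpy) (by omega)
        · omega

-- position t of the sorted list holds x iff t lies in x's rank interval
theorem pv_sorted_getElem_iff (s : List Int) (hs : s.Pairwise (· ≤ ·)) (x : Int)
    (t : Nat) (ht : t < s.length) :
    s[t] = x ↔ (s.countP (fun y => decide (y < x)) ≤ t ∧ t < s.countP (fun y => decide (y ≤ x))) := by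
  have hLe := pv_sorted_getElem_p s hs (fun y => decide (y ≤ x))
    (fun a b hab hb => by simp at hb ⊢; omega) t ht
  have hLt := pv_sorted_getElem_p s hs (fun y => decide (y < x))
    (fun a b hab hb => by simp at hb ⊢; omega) t ht
  simp only [decide_eq_true_eq] at hLe hLt
  constructor
  · intro h
    have h1 : s[t] ≤ x := le_of_eq h
    have h2 : ¬ s[t] < x := by omega
    exact ⟨by omega, hLe.mp h1⟩
  · rintro ⟨h1, h2⟩
    have hle : s[t] ≤ x := hLe.mpr h2
    have hnlt : ¬ s[t] < x := fun hlt => by have := hLt.mp hlt; omega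
    omega

-- nondecreasing + nodup = strictly increasing
theorem pv_pairwise_lt_of_le_nodup (l : List Int) (h1 : l.Pairwise (· ≤ ·)) (h2 : l.Nodup) :
    l.Pairwise (· < ·) :=
  (List.Pairwise.and h1 h2).imp (fun h => lt_of_le_of_ne h.1 h.2)

-- the pointer advance: it never moves back, stays in range, skips exactly the ranks < cum
theorem pv_advance_spec (ts : List Int) (cum : Int) (ti : Nat) :
    ti ≤ ts.length →
    (ti ≤ pvAdvance ts cum ti ∧ pvAdvance ts cum ti ≤ ts.length ∧
    (∀ j, (hj : j < ts.length) → ti ≤ j → j < pvAdvance ts cum ti → ts[j] < cum) ∧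
    (∀ hadv : pvAdvance ts cum ti < ts.length, cum ≤ ts[pvAdvance ts cum ti])) := by
  fun_induction pvAdvance ts cum ti with
  | case1 ti h hlt ih =>
    intro hti
    obtain ⟨i1, i2, i3, i4⟩ := ih (by omega)
    refine ⟨by omega, i2, ?_, i4⟩
    intro j hj hij hja
    rcases Nat.eq_or_lt_of_le hij with rfl | h'
    · exact hlt
    · exact i3 j hj h' hja
  | case2 ti h hnlt =>
    intro hti
    exact ⟨le_refl _, le_of_lt h, fun j hj hij hja => absurd (lt_of_le_of_lt hij hja) (lt_irrefl _),
      fun hadv => not_lt.mp hnlt⟩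
  | case3 ti h =>
    intro hti
    exact ⟨le_refl _, hti, fun j hj hij hja => absurd (lt_of_le_of_lt hij hja) (lt_irrefl _),
      fun hadv => absurd hadv h⟩

-- getElem monotonicity on a nondecreasing list
theorem pv_ts_mono (ts : List Int) (hts : ts.Pairwise (· ≤ ·)) (i j : Nat) (hij : i ≤ j)
    (hj : j < ts.length) : ts[i]'(lt_of_le_of_lt hij hj) ≤ ts[j] := by
  rcases Nat.eq_or_lt_of_le hij with rfl | h
  · exact le_refl _
  · exact List.pairwise_iff_getElem.mp hts i j (lt_of_le_of_lt hij hj) hj h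

-- B's cumulative two-pointer scan: invariant over the (strictly sorted) suffix V of
-- distinct values, with the rank pointer between the consumed and the pending ranks
theorem pv_fold_inv (lengths ts : List Int) (hts : ts.Pairwise (· ≤ ·)) :
    ∀ (V : List Int) (acc : Int × Nat × List Int),
    V.Pairwise (· < ·) →
    (∀ y ∈ lengths, y ∉ V → ∀ v ∈ V, y < v) →
    acc.1 = (lengths.countP (fun y => decide (y ∉ V)) : Int) →
    acc.2.1 ≤ ts.length →
    (∀ j, (hj : j < ts.length) → j < acc.2.1 → ts[j] < acc.1) →
    (∀ j, (hj : j < ts.length) → acc.2.1 ≤ j → acc.1 ≤ ts[j]) →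
    acc.2.2.Pairwise (· < ·) →
    (∀ a ∈ acc.2.2, ∀ v ∈ V, a < v) →
    ((V.foldl (fun (st : Int × Nat × List Int) v =>
        let cum := st.1 + (lengths.count v : Int)
        if h : st.2.1 < ts.length then
          if ts[st.2.1] < cum then
            (cum, pvAdvance ts cum st.2.1, st.2.2 ++ [v])
          else (cum, st.2.1, st.2.2)
        else (cum, st.2.1, st.2.2)) acc).2.2.Pairwise (· < ·) ∧
    ∀ x, (x ∈ (V.foldl (fun (st : Int × Nat × List Int) v =>
        let cum := st.1 + (lengths.count v : Int)
        if h : st.2.1 < ts.length then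
          if ts[st.2.1] < cum then
            (cum, pvAdvance ts cum st.2.1, st.2.2 ++ [v])
          else (cum, st.2.1, st.2.2)
        else (cum, st.2.1, st.2.2)) acc).2.2 ↔
      x ∈ acc.2.2 ∨ (x ∈ V ∧ ∃ t ∈ ts,
        (lengths.countP (fun y => decide (y < x)) : Int) ≤ t ∧
        t < (lengths.countP (fun y => decide (y ≤ x)) : Int)))) := by
  intro V
  induction V with
  | nil =>
    intro acc _ _ _ _ _ _ hacc2 _
    exact ⟨hacc2, fun x => by simp⟩
  | cons v V' ih =>
    intro acc hV hlow hacc1 hti hconsumed hpending hacc2 hbound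
    obtain ⟨hvV', hV'⟩ := List.pairwise_cons.mp hV
    -- the entry accumulator counts exactly the elements below v
    have hmemiff : ∀ y ∈ lengths, (y ∉ v :: V') ↔ y < v := by
      intro y hy
      constructor
      · intro hne; exact hlow y hy hne v (List.mem_cons_self ..)
      · intro hlt
        simp only [List.mem_cons, not_or]
        exact ⟨by omega, fun hmem => by have := hvV' y hmem; omega⟩
    have hprev : lengths.countP (fun y => decide (y ∉ v :: V')) =
        lengths.countP (fun y => decide (y < v)) := by
      apply List.countP_congr
      intro y hy
      simpa using hmemiff y hy
    have hmemiff' : ∀ y ∈ lengths, (y ∉ V') ↔ y ≤ v := by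
      intro y hy
      constructor
      · intro hne
        by_cases hyv : y = v
        · omega
        · have : y ∉ v :: V' := by simp [hyv, hne]
          have := (hmemiff y hy).mp this; omega
      · intro hle hmem
        have := hvV' y hmem; omega
    have hcum : lengths.countP (fun y => decide (y ∉ V')) =
        lengths.countP (fun y => decide (y ≤ v)) := by
      apply List.countP_congr
      intro y hy
      simpa using hmemiff' y hy
    have hstep1 : acc.1 + (lengths.count v : Int) =
        (lengths.countP (fun y => decide (y ∉ V')) : Int) := by
      rw [hacc1, hprev, hcum]
      have := pv_count_le_split lengths v
      omega
    have h1v : acc.1 = (lengths.countP (fun y => decide (y < v)) : Int) := by rw [hacc1, hprev]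
    have h2v : acc.1 + (lengths.count v : Int) = (lengths.countP (fun y => decide (y ≤ v)) : Int) := by
      rw [h1v]; have := pv_count_le_split lengths v; omega
    have hle : acc.1 ≤ acc.1 + (lengths.count v : Int) := by
      have : (0 : Int) ≤ (lengths.count v : Int) := Int.natCast_nonneg _
      omega
    have hlow' : ∀ y ∈ lengths, y ∉ V' → ∀ u ∈ V', y < u := by
      intro y hy hne u hu
      by_cases hyv : y = v
      · subst hyv; exact hvV' u hu
      · have : y ∉ v :: V' := by simp [hyv, hne]
        exact hlow y hy this u (List.mem_cons_of_mem _ hu)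
    simp only [List.foldl_cons]
    by_cases hlen : acc.2.1 < ts.length
    · by_cases hhit : ts[acc.2.1] < acc.1 + (lengths.count v : Int)
      · -- hit: v is a bin edge; advance the pointer past its interval
        rw [dif_pos hlen, if_pos hhit]
        obtain ⟨a1, a2, a3, a4⟩ := pv_advance_spec ts (acc.1 + (lengths.count v : Int)) acc.2.1
          (le_of_lt hlen)
        have hnew_consumed : ∀ j, (hj : j < ts.length) →
            j < pvAdvance ts (acc.1 + (lengths.count v : Int)) acc.2.1 →
            ts[j] < acc.1 + (lengths.count v : Int) := by
          intro j hj hja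
          by_cases hjt : j < acc.2.1
          · exact lt_of_lt_of_le (hconsumed j hj hjt) hle
          · exact a3 j hj (by omega) hja
        have hnew_pending : ∀ j, (hj : j < ts.length) →
            pvAdvance ts (acc.1 + (lengths.count v : Int)) acc.2.1 ≤ j →
            acc.1 + (lengths.count v : Int) ≤ ts[j] := by
          intro j hj hja
          exact le_trans (a4 (lt_of_le_of_lt hja hj)) (pv_ts_mono ts hts _ j hja hj)
        have hnewacc2 : (acc.2.2 ++ [v]).Pairwise (· < ·) := by
          refine List.pairwise_append.mpr ⟨hacc2, List.pairwise_singleton _ _, ?_⟩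
          intro a ha b hb
          rcases List.mem_singleton.mp hb with rfl
          exact hbound a ha b (List.mem_cons_self ..)
        have hnewbound : ∀ a ∈ acc.2.2 ++ [v], ∀ u ∈ V', a < u := by
          intro a ha u hu
          have hvu := hvV' u hu
          rcases List.mem_append.mp ha with ha' | ha'
          · exact lt_trans (hbound a ha' v (List.mem_cons_self ..)) hvu
          · rcases List.mem_singleton.mp ha'; exact hvu
        obtain ⟨hres1, hres2⟩ := ih ((acc.1 + (lengths.count v : Int)),
            pvAdvance ts (acc.1 + (lengths.count v : Int)) acc.2.1, acc.2.2 ++ [v])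
          hV' hlow' hstep1 a2 hnew_consumed hnew_pending hnewacc2 hnewbound
        refine ⟨hres1, fun x => ?_⟩
        rw [hres2 x]
        constructor
        · rintro (hx | ⟨hxV, ht⟩)
          · rcases List.mem_append.mp hx with h | h
            · exact Or.inl h
            · rcases List.mem_singleton.mp h with rfl
              refine Or.inr ⟨List.mem_cons_self .., ts[acc.2.1], List.getElem_mem hlen, ?_, ?_⟩
              · rw [← h1v]; exact hpending acc.2.1 hlen (le_refl _)
              · rw [← h2v]; exact hhit
          · exact Or.inr ⟨List.mem_cons_of_mem _ hxV, ht⟩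
        · rintro (hx | ⟨hxV, ht⟩)
          · exact Or.inl (List.mem_append.mpr (Or.inl hx))
          · rcases List.mem_cons.mp hxV with rfl | hxV'
            · exact Or.inl (List.mem_append.mpr (Or.inr (List.mem_singleton.mpr rfl)))
            · exact Or.inr ⟨hxV', ht⟩
      · -- the next pending rank is past v's interval: v is not an edge, nothing moves
        rw [dif_pos hlen, if_neg hhit]
        have hnotP : ¬ ∃ t ∈ ts, (lengths.countP (fun y => decide (y < v)) : Int) ≤ t ∧
            t < (lengths.countP (fun y => decide (y ≤ v)) : Int) := by
          rintro ⟨t, htmem, hta, htb⟩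
          obtain ⟨j, hj, rfl⟩ := List.mem_iff_getElem.mp htmem
          by_cases hjt : j < acc.2.1
          · have := hconsumed j hj hjt
            rw [h1v] at this; omega
          · have := pv_ts_mono ts hts acc.2.1 j (by omega) hj
            rw [← h2v] at htb
            exact hhit (by omega)
        obtain ⟨hres1, hres2⟩ := ih ((acc.1 + (lengths.count v : Int)), acc.2.1, acc.2.2)
          hV' hlow' hstep1 (le_of_lt hlen)
          (fun j hj hjt => lt_of_lt_of_le (hconsumed j hj hjt) hle)
          (fun j hj hjt => by
            have := pv_ts_mono ts hts acc.2.1 j hjt hj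
            have := not_lt.mp hhit
            omega)
          hacc2
          (fun a ha u hu => lt_trans (hbound a ha v (List.mem_cons_self ..)) (hvV' u hu))
        refine ⟨hres1, fun x => ?_⟩
        rw [hres2 x]
        constructor
        · rintro (hx | ⟨hxV, ht⟩)
          · exact Or.inl hx
          · exact Or.inr ⟨List.mem_cons_of_mem _ hxV, ht⟩
        · rintro (hx | ⟨hxV, ht⟩)
          · exact Or.inl hx
          · rcases List.mem_cons.mp hxV with rfl | hxV'
            · exact absurd ht hnotP
            · exact Or.inr ⟨hxV', ht⟩
    · -- all ranks consumed: no later value is an edge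
      rw [dif_neg hlen]
      have hnotP : ¬ ∃ t ∈ ts, (lengths.countP (fun y => decide (y < v)) : Int) ≤ t ∧
          t < (lengths.countP (fun y => decide (y ≤ v)) : Int) := by
        rintro ⟨t, htmem, hta, htb⟩
        obtain ⟨j, hj, rfl⟩ := List.mem_iff_getElem.mp htmem
        have := hconsumed j hj (by omega)
        rw [h1v] at this; omega
      obtain ⟨hres1, hres2⟩ := ih ((acc.1 + (lengths.count v : Int)), acc.2.1, acc.2.2)
        hV' hlow' hstep1 hti
        (fun j hj hjt => lt_of_lt_of_le (hconsumed j hj hjt) hle)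
        (fun j hj hjt => absurd (lt_of_le_of_lt hjt hj) (by omega))
        hacc2
        (fun a ha u hu => lt_trans (hbound a ha v (List.mem_cons_self ..)) (hvV' u hu))
      refine ⟨hres1, fun x => ?_⟩
      rw [hres2 x]
      constructor
      · rintro (hx | ⟨hxV, ht⟩)
        · exact Or.inl hx
        · exact Or.inr ⟨List.mem_cons_of_mem _ hxV, ht⟩
      · rintro (hx | ⟨hxV, ht⟩)
        · exact Or.inl hx
        · rcases List.mem_cons.mp hxV with rfl | hxV'
          · exact absurd ht hnotP
          · exact Or.inr ⟨hxV', ht⟩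

-- indexing the sorted list hits x iff the index lies in x's rank interval (counts over lengths)
theorem pv_get_rank (lengths : List Int) (x t : Int) (h0 : 0 ≤ t) (ht : t < (lengths.length : Int)) :
    ((PySem.List.pyGet? (PySem.List.sorted lengths id) t).getD 0 = x) ↔
    ((lengths.countP (fun y => decide (y < x)) : Int) ≤ t ∧
      t < (lengths.countP (fun y => decide (y ≤ x)) : Int)) := by
  have hperm : (PySem.List.sorted lengths id).Perm lengths := PySem.List.sorted_perm lengths id false
  have hlen : (PySem.List.sorted lengths id).length = lengths.length := hperm.length_eq
  have htN : t.toNat < (PySem.List.sorted lengths id).length := by omega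
  have hg : PySem.List.pyGet? (PySem.List.sorted lengths id) t =
      (PySem.List.sorted lengths id)[t.toNat]? := by
    rw [show t = (t.toNat : Int) by omega, PySem.List.pyGet?_natCast]
    congr 1
  rw [hg, List.getElem?_eq_getElem htN]
  simp only [Option.getD_some]
  have hpair : (PySem.List.sorted lengths id).Pairwise (· ≤ ·) := by
    simpa using PySem.List.sorted_pairwise lengths id
  rw [pv_sorted_getElem_iff _ hpair x t.toNat htN]
  have e1 : (PySem.List.sorted lengths id).countP (fun y => decide (y < x)) =
      lengths.countP (fun y => decide (y < x)) := hperm.countP_eq _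
  have e2 : (PySem.List.sorted lengths id).countP (fun y => decide (y ≤ x)) =
      lengths.countP (fun y => decide (y ≤ x)) := hperm.countP_eq _
  omega

-- an in-range position of the sorted list holds an element of lengths
theorem pv_get_mem (lengths : List Int) (t : Int) (h0 : 0 ≤ t) (ht : t < (lengths.length : Int)) :
    (PySem.List.pyGet? (PySem.List.sorted lengths id) t).getD 0 ∈ lengths := by
  have hperm : (PySem.List.sorted lengths id).Perm lengths := PySem.List.sorted_perm lengths id false
  have hlen : (PySem.List.sorted lengths id).length = lengths.length := hperm.length_eq
  have htN : t.toNat < (PySem.List.sorted lengths id).length := by omega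
  have hg : PySem.List.pyGet? (PySem.List.sorted lengths id) t =
      (PySem.List.sorted lengths id)[t.toNat]? := by
    rw [show t = (t.toNat : Int) by omega, PySem.List.pyGet?_natCast]
    congr 1
  rw [hg, List.getElem?_eq_getElem htN]
  simp only [Option.getD_some]
  exact hperm.mem_iff.mp (List.getElem_mem htN)

-- the main equivalence on nonempty input
theorem pv_main (lengths : List Int) (n_bins : Int) (hne : lengths ≠ []) :
    compute_length_bins lengths n_bins = compute_length_bins_alt lengths n_bins := by
  unfold compute_length_bins compute_length_bins_alt
  rw [if_neg hne, if_neg hne]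
  have hperm : (PySem.List.sorted lengths id).Perm lengths := PySem.List.sorted_perm lengths id false
  have hlen : (PySem.List.sorted lengths id).length = lengths.length := hperm.length_eq
  have hlenpos : 0 < lengths.length := List.length_pos_iff.mpr hne
  have hsne : PySem.List.sorted lengths id ≠ [] := by
    intro h
    have hl := hperm.length_eq
    rw [h] at hl
    exact hne (List.eq_nil_of_length_eq_zero (by simpa using hl.symm))
  have hbins := PySem.List.foldl_append_singleton_eq_map
      (fun i => (PySem.List.pyGet? (PySem.List.sorted lengths id)
        (PySem.Int.floordiv ((lengths.length : Int) * i) n_bins)).getD 0)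
      (PySem.List.pyRange 1 n_bins) []
  simp only [List.nil_append] at hbins
  simp only [PySem.Dict.foldl_insert_getD_add_one_eq_counter, PySem.Dict.getD_counter,
    PySem.Dict.keys_counter, pv_get_neg_one _ hsne, hlen]
  rw [hbins]
  set T : List Int := ((PySem.List.pyRange 1 n_bins).foldl
      (fun st i => st.add (PySem.Int.floordiv ((lengths.length : Int) * i) n_bins))
      (PySem.Set.ofList [])).add ((lengths.length : Int) - 1) with hT
  have hTmem : ∀ t : Int, t ∈ T ↔
      ((∃ i ∈ PySem.List.pyRange 1 n_bins, t = PySem.Int.floordiv ((lengths.length : Int) * i) n_bins)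
        ∨ t = (lengths.length : Int) - 1) := by
    intro t
    rw [hT, PySem.Set.mem_add, pv_mem_foldl_add]
    simp
  have hTbound : ∀ t ∈ T, 0 ≤ t ∧ t < (lengths.length : Int) := by
    intro t ht
    rcases (hTmem t).mp ht with ⟨i, hi, rfl⟩ | rfl
    · obtain ⟨h1, h2⟩ := PySem.List.mem_pyRange_one.mp hi
      exact pv_idx_bounds _ n_bins i (by exact_mod_cast hlenpos) h1 h2
    · omega
  have hvals_mem : ∀ x : Int, x ∈ PySem.List.sorted (PySem.Set.ofList lengths) id ↔ x ∈ lengths := by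
    intro x
    rw [(PySem.List.sorted_perm (PySem.Set.ofList lengths) id false).mem_iff, PySem.Set.mem_ofList]
  have hvals_le : (PySem.List.sorted (PySem.Set.ofList lengths) id).Pairwise (· ≤ ·) := by
    simpa using PySem.List.sorted_pairwise (PySem.Set.ofList lengths) id
  have hvals_nodup : (PySem.List.sorted (PySem.Set.ofList lengths) id).Nodup :=
    ((PySem.List.sorted_perm (PySem.Set.ofList lengths) id false).nodup_iff).mpr
      (PySem.Set.nodup_ofList lengths)
  have hvals_lt := pv_pairwise_lt_of_le_nodup _ hvals_le hvals_nodup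
  have hts_pair : (PySem.List.sorted T id).Pairwise (· ≤ ·) := by
    simpa using PySem.List.sorted_pairwise T id
  have hts_mem : ∀ t : Int, t ∈ PySem.List.sorted T id ↔ t ∈ T :=
    fun t => (PySem.List.sorted_perm T id false).mem_iff
  obtain ⟨hout_lt, hout_mem⟩ := pv_fold_inv lengths (PySem.List.sorted T id) hts_pair
    (PySem.List.sorted (PySem.Set.ofList lengths) id) ((0 : Int), (0 : Nat), ([] : List Int))
    hvals_lt
    (fun y hy hnot v hv => absurd ((hvals_mem y).mpr hy) hnot)
    (by
      have hz : lengths.countP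
          (fun y => decide (y ∉ PySem.List.sorted (PySem.Set.ofList lengths) id)) = 0 :=
        List.countP_eq_zero.mpr (fun y hy => by simp [(hvals_mem y).mpr hy])
      show (0 : Int) = _
      rw [hz]
      simp)
    (Nat.zero_le _)
    (fun j hj h => absurd h (Nat.not_lt_zero j))
    (fun j hj _ => (hTbound _ ((hts_mem _).mp (List.getElem_mem hj))).1)
    (by simp) (by simp)
  apply PySem.List.sorted_eq_of_perm_of_pairwise_lt
  · rw [List.perm_ext_iff_of_nodup (hout_lt.imp fun h => ne_of_lt h) (PySem.Set.nodup_ofList _)]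
    intro x
    rw [hout_mem x]
    simp only [List.not_mem_nil, false_or, PySem.Set.mem_ofList, List.mem_append, List.mem_map,
      List.mem_singleton]
    constructor
    · rintro ⟨hxv, t, hts_t, h1, h2⟩
      have htT : t ∈ T := (hts_mem t).mp hts_t
      obtain ⟨h0, hn⟩ := hTbound t htT
      have hx := (pv_get_rank lengths x t h0 hn).mpr ⟨h1, h2⟩
      rcases (hTmem t).mp htT with ⟨i, hi, rfl⟩ | rfl
      · exact Or.inl ⟨i, hi, hx⟩
      · exact Or.inr hx.symm
    · rintro (⟨i, hi, hx⟩ | hx)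
      · have htT : PySem.Int.floordiv ((lengths.length : Int) * i) n_bins ∈ T :=
          (hTmem _).mpr (Or.inl ⟨i, hi, rfl⟩)
        obtain ⟨h0, hn⟩ := hTbound _ htT
        obtain ⟨hr1, hr2⟩ := (pv_get_rank lengths x _ h0 hn).mp hx
        exact ⟨(hvals_mem x).mpr (hx ▸ pv_get_mem lengths _ h0 hn), _, (hts_mem _).mpr htT, hr1, hr2⟩
      · have htT : (lengths.length : Int) - 1 ∈ T := (hTmem _).mpr (Or.inr rfl)
        obtain ⟨h0, hn⟩ := hTbound _ htT
        obtain ⟨hr1, hr2⟩ := (pv_get_rank lengths x _ h0 hn).mp hx.symm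
        exact ⟨(hvals_mem x).mpr (hx ▸ pv_get_mem lengths _ h0 hn), _, (hts_mem _).mpr htT, hr1, hr2⟩
  · exact hout_lt

-- ===== VERDICT (by name: the statement is the Claim_ definition above) =====
theorem compute_length_bins_spec : Claim_equal_compute_length_bins := by
  intro lengths n_bins _
  unfold Spec_compute_length_bins
  by_cases h : lengths = []
  · subst h; rfl
  · exact pv_main lengths n_bins h
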